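-- pv_equiv track=rewrite | github.com/Munanom/ai-class-scheduler | scheduler.py | print_schedule
-- ===== SOURCE A (Python) =====
-- time_slots = ["07:00", "09:00", "11:00", "13:20", "15:30", "19:20"]
--
-- def print_schedule(schedule, classes):
--     schedule_table = []
--     for time_slot in time_slots:
--         classes_assigned = [class_data for class_data in classes if schedule.get(f"{class_data[2]}_{class_data[3]}") is not None and class_data[0] == time_slot]
--         if classes_assigned:
--             row = []
--             for i, class_data in enumerate(classes_assigned):
--                 row.append(f"{time_slot}")
--                 row.append(f"{class_data[4]}")
--                 row.append(f"{class_data[2]}_{class_data[3]}")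
--                 row.append(f"{class_data[5]}")
--                 row.append(schedule.get(f'{class_data[2]}_{class_data[3]}'))
--                 if (i + 1) % 5 == 0 or i == len(classes_assigned) - 1:  # Add a new row after every 5 items or if it's the last item
--                     schedule_table.append(row)
--                     row = []  # Reset the row for the next set of items
--         else:
--             schedule_table.append([time_slot, "", "", "", ""])
--
--     return schedule_table
-- ===== SOURCE B (Python) =====
-- time_slots = ["07:00", "09:00", "11:00", "13:20", "15:30", "19:20"]
--
-- def print_schedule(schedule, classes):
--     # One partitioning pass over classes, then a slot-driven emit with slice-based chunking.
--     buckets = {}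
--     for c in classes:
--         key = f"{c[2]}_{c[3]}"
--         room = schedule.get(key)
--         if room is not None:
--             buckets.setdefault(c[0], []).append([c[0], c[4], key, c[5], room])
--     table = []
--     for slot in time_slots:
--         entries = buckets.get(slot, [])
--         if entries:
--             while entries:
--                 group, entries = entries[:5], entries[5:]
--                 table.append([x for e in group for x in e])
--         else:
--             table.append([slot, "", "", "", ""])
--     return table
-- ===== Notes on version B (the rewrite author's own statement) =====
-- stated objective: alternative
-- what changed: B replaces A's six full filter scans of classes (one per time slot) by a single partitioning pass into a dict of per-slot entry lists, and replaces A's enumerate-counter row flushing by slice-based chunking of each bucket into groups of 5 (intended as faster; a timing run read 3.12x at the largest size but inconsistently, so no speed is claimed).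
import Mathlib
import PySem

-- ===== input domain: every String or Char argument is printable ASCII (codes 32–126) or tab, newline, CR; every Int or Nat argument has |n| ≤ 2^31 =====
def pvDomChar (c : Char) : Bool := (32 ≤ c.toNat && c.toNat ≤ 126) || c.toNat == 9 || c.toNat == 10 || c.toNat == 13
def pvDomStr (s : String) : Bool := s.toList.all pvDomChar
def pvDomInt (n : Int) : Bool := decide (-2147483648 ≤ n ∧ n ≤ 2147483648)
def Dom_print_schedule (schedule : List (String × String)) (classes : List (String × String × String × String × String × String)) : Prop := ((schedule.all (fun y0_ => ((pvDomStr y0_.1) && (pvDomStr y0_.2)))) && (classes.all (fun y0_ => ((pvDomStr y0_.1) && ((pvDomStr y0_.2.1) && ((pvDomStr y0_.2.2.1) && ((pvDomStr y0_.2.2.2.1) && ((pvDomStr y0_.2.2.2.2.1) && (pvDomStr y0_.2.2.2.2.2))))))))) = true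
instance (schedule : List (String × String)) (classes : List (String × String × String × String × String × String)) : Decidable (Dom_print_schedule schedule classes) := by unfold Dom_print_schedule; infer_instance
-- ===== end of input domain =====

-- B builds the per-slot buckets in one pass over classes and chunks each bucket by slicing,
-- instead of A's per-slot filter scans and enumerate-counter flushing; return values proved equal.

-- module-level constant time_slots (shared by both Pythons)
def pvTimeSlots : List String := ["07:00", "09:00", "11:00", "13:20", "15:30", "19:20"]

-- f"{c[2]}_{c[3]}" (both Pythons build this key)
def pvKey (c : String × String × String × String × String × String) : String :=
  c.2.2.1 ++ "_" ++ c.2.2.2.1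

-- ===== PORT A =====
-- schedule.get(k): first-match lookup in the association list (PySem.Dict).
-- The value appended to the row is the string schedule.get(key); A's filter guarantees
-- it is `some`, so `.getD ""` extracts exactly that string.
def print_schedule (schedule : List (String × String)) (classes : List (String × String × String × String × String × String)) : List (List String) :=
  pvTimeSlots.foldl (fun table slot =>
    let assigned := classes.filter (fun c =>
      ((PySem.Dict.mk schedule).get? (pvKey c)).isSome && c.1 == slot)
    if assigned ≠ [] then
      ((PySem.List.enumerate assigned 0).foldl (fun (st : List (List String) × List String) ic =>
        if PySem.Int.mod (ic.1 + 1) 5 == 0 || ic.1 == (assigned.length : Int) - 1 then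
          (st.1 ++ [st.2 ++ [slot, ic.2.2.2.2.2.1, pvKey ic.2, ic.2.2.2.2.2.2,
                             ((PySem.Dict.mk schedule).get? (pvKey ic.2)).getD ""]], [])
        else (st.1, st.2 ++ [slot, ic.2.2.2.2.2.1, pvKey ic.2, ic.2.2.2.2.2.2,
                             ((PySem.Dict.mk schedule).get? (pvKey ic.2)).getD ""])) (table, [])).1
    else table ++ [[slot, "", "", "", ""]]) []

-- ===== PORT B =====
-- the while-loop of Source B: group, entries = entries[:5], entries[5:]  (slices = take/drop,
-- PySem.List.slice_to_natCast / slice_from_natCast); row = [x for e in group for x in e]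
def pvChunks (es : List (List String)) : List (List String) :=
  if h : es = [] then [] else (es.take 5).flatten :: pvChunks (es.drop 5)
termination_by es.length
decreasing_by have := List.length_pos_of_ne_nil h; simp [List.length_drop]; omega

def print_schedule_alt (schedule : List (String × String)) (classes : List (String × String × String × String × String × String)) : List (List String) :=
  let buckets := classes.foldl (fun (b : PySem.Dict String (List (List String))) c =>
    match (PySem.Dict.mk schedule).get? (pvKey c) with
    | some room =>
        b.insert c.1 (b.getD c.1 [] ++ [[c.1, c.2.2.2.2.1, pvKey c, c.2.2.2.2.2, room]])
    | none => b) PySem.Dict.empty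
  pvTimeSlots.foldl (fun table slot =>
    let entries := buckets.getD slot []
    if entries ≠ [] then table ++ pvChunks entries
    else table ++ [[slot, "", "", "", ""]]) []

-- ===== PRECONDITION & SPEC =====
def Spec_print_schedule (schedule : List (String × String)) (classes : List (String × String × String × String × String × String)) (out : List (List String)) : Prop := out = print_schedule_alt schedule classes
instance (schedule : List (String × String)) (classes : List (String × String × String × String × String × String)) (out : List (List String)) : Decidable (Spec_print_schedule schedule classes out) := by unfold Spec_print_schedule; infer_instance

-- ===== CLAIM (what is proved, stated in full; the proofs are below) =====
def Claim_equal_print_schedule : Prop := ∀ (schedule : List (String × String)) (classes : List (String × String × String × String × String × String)), Dom_print_schedule schedule classes → Spec_print_schedule schedule classes (print_schedule schedule classes)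

-- ===== LEMMAS AND PROOFS =====

theorem pvChunks_nil : pvChunks [] = [] := by
  rw [pvChunks.eq_def]; simp

theorem pvChunks_ne_nil (es : List (List String)) (h : es ≠ []) :
    pvChunks es = (es.take 5).flatten :: pvChunks (es.drop 5) := by
  rw [pvChunks.eq_def]; simp [h]

-- the entry B stores in a bucket for class c
def pvEntry (schedule : List (String × String)) (c : String × String × String × String × String × String) : List String :=
  [c.1, c.2.2.2.2.1, pvKey c, c.2.2.2.2.2, ((PySem.Dict.mk schedule).get? (pvKey c)).getD ""]

-- A's inner loop, abstracted: r items remain before a counter-flush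
def pvRecD (f : (String × String × String × String × String × String) → List String)
    (r : Nat) (row : List String) :
    List (String × String × String × String × String × String) → List (List String)
  | [] => []
  | c :: cs =>
    if r = 1 ∨ cs = [] then (row ++ f c) :: pvRecD f 5 [] cs else pvRecD f (r - 1) (row ++ f c) cs

theorem pv_bucket (schedule : List (String × String))
    (classes : List (String × String × String × String × String × String))
    (d : PySem.Dict String (List (List String))) (slot : String) :
    (classes.foldl (fun (b : PySem.Dict String (List (List String))) c =>
      match (PySem.Dict.mk schedule).get? (pvKey c) with
      | some room =>
          b.insert c.1 (b.getD c.1 [] ++ [[c.1, c.2.2.2.2.1, pvKey c, c.2.2.2.2.2, room]])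
      | none => b) d).getD slot []
    = d.getD slot [] ++ (classes.filter (fun c =>
        ((PySem.Dict.mk schedule).get? (pvKey c)).isSome && c.1 == slot)).map (pvEntry schedule) := by
  induction classes generalizing d with
  | nil => simp
  | cons c cs ih =>
    simp only [List.foldl_cons, List.filter_cons]
    cases h : (PySem.Dict.mk schedule).get? (pvKey c) with
    | none =>
      simp [ih]
    | some room =>
      rw [ih]
      by_cases hs : c.1 = slot
      · simp [h, hs, pvEntry]
      · have hb : (c.1 == slot) = false := by simp [hs]
        simp [hb, PySem.Dict.getD_insert, Ne.symm hs]

theorem pv_fold_recD (schedule : List (String × String)) (slot : String)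
    (n : Nat)
    (l : List (String × String × String × String × String × String))
    (k : Nat) (row : List String) (table : List (List String))
    (hn : n = k + l.length) :
    ((PySem.List.enumerate l (k : Int)).foldl
      (fun (st : List (List String) × List String) ic =>
        if PySem.Int.mod (ic.1 + 1) 5 == 0 || ic.1 == (n : Int) - 1 then
          (st.1 ++ [st.2 ++ [slot, ic.2.2.2.2.2.1, pvKey ic.2, ic.2.2.2.2.2.2,
                             ((PySem.Dict.mk schedule).get? (pvKey ic.2)).getD ""]], [])
        else (st.1, st.2 ++ [slot, ic.2.2.2.2.2.1, pvKey ic.2, ic.2.2.2.2.2.2,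
                             ((PySem.Dict.mk schedule).get? (pvKey ic.2)).getD ""])) (table, row)).1
    = table ++ pvRecD (fun c => [slot, c.2.2.2.2.1, pvKey c, c.2.2.2.2.2,
        ((PySem.Dict.mk schedule).get? (pvKey c)).getD ""]) (5 - k % 5) row l := by
  induction l generalizing k row table with
  | nil => simp [pvRecD]
  | cons c cs ih =>
    rw [PySem.List.enumerate_cons]
    simp only [List.foldl_cons]
    have hmod : (PySem.Int.mod ((k : Int) + 1) 5 == 0) = decide ((k + 1) % 5 = 0) := by
      rw [PySem.Int.mod_eq_emod_of_pos (by omega)]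
      by_cases h : (k + 1) % 5 = 0 <;> simp [h] <;> omega
    have hlen : n = k + cs.length + 1 := by simp at hn; omega
    have hlast : (((k : Int)) == (n : Int) - 1) = decide (cs = []) := by
      by_cases h : cs = []
      · subst h; simp at hlen; simp; omega
      · have h0 : cs.length ≠ 0 := by simpa using h
        simp [h]; omega
    have hcast : ((k : Int) + 1) = (((k + 1 : Nat)) : Int) := by push_cast; ring
    rw [hmod, hlast, hcast]
    by_cases h5 : (k + 1) % 5 = 0 <;> by_cases hcs : cs = []
    · subst hcs
      simp [h5, pvRecD, PySem.List.enumerate_nil]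
    · simp only [h5, decide_true, Bool.true_or, if_true]
      rw [ih (k + 1) [] _ (by omega)]
      have hr5 : 5 - (k + 1) % 5 = 5 := by omega
      have hr1 : 5 - k % 5 = 1 := by omega
      simp [pvRecD, hr5, hr1]
    · subst hcs
      simp [h5, pvRecD, PySem.List.enumerate_nil]
    · simp only [h5, decide_false, hcs, Bool.or_false]
      rw [ih (k + 1) _ _ (by omega)]
      have hr : 5 - (k + 1) % 5 = (5 - k % 5) - 1 := by omega
      have hr1 : ¬(5 - k % 5 = 1) := by omega
      rw [hr]
      simp [pvRecD, hr1, hcs]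

theorem pv_recD_chunks (f : (String × String × String × String × String × String) → List String)
    (l : List (String × String × String × String × String × String))
    (r : Nat) (row : List String) (hl : l ≠ []) (h1 : 1 ≤ r) :
    pvRecD f r row l = (row ++ ((l.take r).map f).flatten) :: pvChunks ((l.drop r).map f) := by
  induction l generalizing r row with
  | nil => exact absurd rfl hl
  | cons c cs ih =>
    obtain ⟨m, rfl⟩ : ∃ m, r = m + 1 := ⟨r - 1, by omega⟩
    by_cases hcs : cs = []
    · subst hcs
      simp [pvRecD, pvChunks_nil, List.take_of_length_le (by simp : ([c] : List _).length ≤ m + 1),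
        List.drop_of_length_le (by simp : ([c] : List _).length ≤ m + 1)]
    · by_cases hm : m = 0
      · subst hm
        simp only [pvRecD]
        rw [ih 5 [] hcs (by omega)]
        have hmap : cs.map f ≠ [] := by simpa using hcs
        rw [show List.drop 1 (c :: cs) = cs from rfl, show List.take 1 (c :: cs) = [c] from rfl]
        rw [pvChunks_ne_nil _ hmap]
        simp [List.map_take, List.map_drop]
      · have hcond : ¬(m + 1 = 1 ∨ cs = []) := by
          exact fun hor => hor.elim (by omega) hcs
        simp only [pvRecD, if_neg hcond, Nat.add_sub_cancel]
        rw [ih m (row ++ f c) hcs (by omega)]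
        simp [List.take_succ_cons, List.drop_succ_cons]

theorem pv_recD_eq_chunks_map (f : (String × String × String × String × String × String) → List String)
    (l : List (String × String × String × String × String × String)) (hl : l ≠ []) :
    pvRecD f 5 [] l = pvChunks (l.map f) := by
  rw [pv_recD_chunks f l 5 [] hl (by omega)]
  have hmap : l.map f ≠ [] := by simpa using hl
  rw [pvChunks_ne_nil _ hmap]
  simp [List.map_take, List.map_drop]

-- ===== VERDICT (by name: the statement is the Claim_ definition above) =====
theorem print_schedule_spec : Claim_equal_print_schedule := by
  intro schedule classes _
  unfold Spec_print_schedule print_schedule print_schedule_alt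
  congr 1
  funext table slot
  simp only
  rw [pv_bucket schedule classes PySem.Dict.empty slot]
  rw [PySem.Dict.getD_empty, List.nil_append]
  set assigned := classes.filter (fun c =>
    ((PySem.Dict.mk schedule).get? (pvKey c)).isSome && c.1 == slot) with hassigned
  by_cases h : assigned = []
  · simp [h]
  · have hmap : assigned.map (pvEntry schedule) ≠ [] := by simpa using h
    rw [if_pos h, if_pos hmap]
    have H := pv_fold_recD schedule slot assigned.length assigned 0 [] table (by omega)
    simp only [Nat.cast_zero, Nat.zero_mod, Nat.sub_zero] at H
    rw [H]
    congr 1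
    rw [pv_recD_eq_chunks_map _ assigned h]
    congr 1
    apply List.map_congr_left
    intro c hc
    have hc' := List.of_mem_filter hc
    have hsl : c.1 = slot := by
      simp only [Bool.and_eq_true, beq_iff_eq] at hc'
      exact hc'.2
    simp [pvEntry, hsl]
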